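-- pv_equiv track=rewrite | github.com/MrBrantCode/unitest_baseline | mut_generate/mist_train_cf/cf_96112/solution.py | find_suggestions
-- ===== SOURCE A (Python) =====
-- import bisect
--
-- def find_suggestions(words, frequencies, prefix):
--     """
--     Provides autocomplete or predictive search feature given a prefix.
--
--     Args:
--     words (list): A list of words.
--     frequencies (list): A list of frequencies corresponding to the words.
--     prefix (str): The prefix to search for in the words.
--
--     Returns:
--     list: A list of suggestions based on the prefix, prioritized by frequency.
--     """
--     word_freq = {word: freq for word, freq in zip(words, frequencies)}
--     words.sort()
--     start = bisect.bisect_left(words, prefix)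
--     end = bisect.bisect_right(words, prefix + "~")
--     suggestions = words[start:end]
--     suggestions.sort(key=lambda word: word_freq[word], reverse=True)
--     return suggestions
-- ===== SOURCE B (Python) =====
-- def find_suggestions(words, frequencies, prefix):
--     word_freq = dict(zip(words, frequencies))
--     hi = prefix + "~"
--     matches = [w for w in words if prefix <= w <= hi]
--     return sorted(matches, key=lambda w: (-word_freq[w], w))
-- ===== Notes on version B (the rewrite author's own statement) =====
-- stated objective: alternative
-- what changed: A sorts the whole list, takes a bisect window, and stable-sorts it again by frequency; B never pre-sorts: it filters the unsorted list in one pass and does a single sort with the composite key (-frequency, word), which replaces A's two-stage stable sort. B does not mutate the caller's words list (A sorts it in place); return values are identical.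
import Mathlib
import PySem

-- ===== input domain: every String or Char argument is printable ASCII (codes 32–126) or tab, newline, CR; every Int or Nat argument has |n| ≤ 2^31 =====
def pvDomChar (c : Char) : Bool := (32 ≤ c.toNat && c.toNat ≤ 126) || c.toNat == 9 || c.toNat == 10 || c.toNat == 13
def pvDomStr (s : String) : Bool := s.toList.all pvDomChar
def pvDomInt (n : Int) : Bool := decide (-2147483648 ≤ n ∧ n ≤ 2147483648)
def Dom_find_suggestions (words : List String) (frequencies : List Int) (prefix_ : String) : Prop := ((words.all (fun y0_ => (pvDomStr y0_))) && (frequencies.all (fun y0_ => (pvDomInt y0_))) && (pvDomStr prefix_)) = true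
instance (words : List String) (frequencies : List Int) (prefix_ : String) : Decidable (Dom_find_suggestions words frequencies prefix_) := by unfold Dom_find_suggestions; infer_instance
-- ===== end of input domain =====

-- B drops A's pre-sort/bisect/re-sort pipeline: it filters the unsorted list and does ONE sort with
-- the composite key (-freq, word) (objective: alternative).  A sorts `words` in place, B does NOT
-- mutate it: the equivalence proved here is about the RETURN value only.

-- ===== PORT A =====
-- word_freq = {word: freq for word, freq in zip(words, frequencies)}  (overwrite on duplicate keys)
def pvBuildFreq (words : List String) (frequencies : List Int) : PySem.Dict String Int :=
  (List.zip words frequencies).foldl (fun d p => d.insert p.1 p.2) PySem.Dict.empty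

def find_suggestions (words : List String) (frequencies : List Int) (prefix_ : String) : List String :=
  let word_freq := pvBuildFreq words frequencies
  let ws := PySem.List.sorted words (fun w => w) false
  let start := PySem.List.bisectLeft ws prefix_
  let end_ := PySem.List.bisectRight ws (prefix_ ++ "~")
  let suggestions := PySem.List.slice ws (some (start : Int)) (some (end_ : Int))
  -- word_freq[word] raises KeyError for a missing key; Pre_ excludes that, getD 0 is the total stand-in
  PySem.List.sorted suggestions (fun w => word_freq.getD w 0) true

-- ===== PORT B =====
def find_suggestions_alt (words : List String) (frequencies : List Int) (prefix_ : String) : List String :=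
  let word_freq := pvBuildFreq words frequencies
  let hi := prefix_ ++ "~"
  let matched := words.filter (fun w => decide (prefix_ ≤ w) && decide (w ≤ hi))
  -- sorted(matched, key=lambda w: (-word_freq[w], w)): tuple key via PySem.List.sorted2
  PySem.List.sorted2 matched (fun w => -(word_freq.getD w 0)) (fun w => w) false

-- ===== PRECONDITION & SPEC =====
-- Pre_ excludes exactly the inputs where Python A raises KeyError: a word inside the suggestion
-- range [prefix, prefix + "~"] that is not a key of word_freq (i.e. not among the words zipped with
-- a frequency).  B raises KeyError there too.  (String comparison is stated on .toList so the
-- instance computes; it is Python's code-point order.)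
def Pre_find_suggestions (words : List String) (frequencies : List Int) (prefix_ : String) : Prop :=
  ∀ w ∈ words, (prefix_.toList ≤ w.toList ∧ w.toList ≤ prefix_.toList ++ ['~']) →
    w ∈ words.take frequencies.length
instance (words : List String) (frequencies : List Int) (prefix_ : String) : Decidable (Pre_find_suggestions words frequencies prefix_) := by unfold Pre_find_suggestions; infer_instance

def pvWitness_find_suggestions : List String × List Int × String := (["ab", "ac", "b"], [3, 1, 2], "a")

def Spec_find_suggestions (words : List String) (frequencies : List Int) (prefix_ : String) (out : List String) : Prop := out = find_suggestions_alt words frequencies prefix_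
instance (words : List String) (frequencies : List Int) (prefix_ : String) (out : List String) : Decidable (Spec_find_suggestions words frequencies prefix_ out) := by unfold Spec_find_suggestions; infer_instance

-- ===== CLAIM (what is proved, stated in full; the proofs are below) =====
def Claim_equal_find_suggestions : Prop := ∀ (words : List String) (frequencies : List Int) (prefix_ : String), Dom_find_suggestions words frequencies prefix_ → Pre_find_suggestions words frequencies prefix_ → Spec_find_suggestions words frequencies prefix_ (find_suggestions words frequencies prefix_)

-- ===== LEMMAS AND PROOFS =====

-- The bisect loops on a STRING list (PySem.List.bisectLeft_spec/bisectRight_spec are stated for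
-- Int lists only, so the invariant is re-established here for the String instance): everything
-- left of the returned index is < x (resp. ≤ x), everything right of it is ≥ x (resp. > x).
lemma bisectLeftLoop_spec {α : Type} [LinearOrder α] [inst : DecidableLT α] (xs : List α) (x : α)
    (hs : xs.Pairwise (· ≤ ·)) :
    ∀ (fuel lo hi : Nat), lo ≤ hi → hi ≤ xs.length → hi - lo ≤ fuel →
    (∀ j (hj : j < xs.length), j < lo → xs[j] < x) →
    (∀ j (hj : j < xs.length), hi ≤ j → x ≤ xs[j]) →
    PySem.List.bisectLeftLoop xs x fuel lo hi ≤ xs.length ∧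
    (∀ j (hj : j < xs.length), j < PySem.List.bisectLeftLoop xs x fuel lo hi → xs[j] < x) ∧
    (∀ j (hj : j < xs.length), PySem.List.bisectLeftLoop xs x fuel lo hi ≤ j → x ≤ xs[j]) := by
  intro fuel
  induction fuel with
  | zero =>
    intro lo hi h1 h2 h3 hlo hhi
    have : lo = hi := by omega
    subst this
    simp only [PySem.List.bisectLeftLoop]
    exact ⟨by omega, hlo, hhi⟩
  | succ fuel ih =>
    intro lo hi h1 h2 h3 hlo hhi
    simp only [PySem.List.bisectLeftLoop]
    by_cases hlt : lo < hi
    · simp only [hlt, if_true]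
      have hmid : (lo + hi) / 2 < xs.length := by omega
      rw [List.getElem?_eq_getElem hmid]
      have hpw := List.pairwise_iff_getElem.mp hs
      by_cases hx : xs[(lo + hi) / 2] < x
      · simp only [hx, if_true]
        refine ih ((lo + hi) / 2 + 1) hi (by omega) h2 (by omega) ?_ hhi
        intro j hj hjlt
        rcases Nat.lt_succ_iff_lt_or_eq.mp hjlt with h | h
        · exact lt_of_le_of_lt (hpw j ((lo + hi) / 2) hj hmid h) hx
        · subst h; exact hx
      · simp only [hx, if_false]
        refine ih lo ((lo + hi) / 2) (by omega) (by omega) (by omega) hlo ?_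
        intro j hj hjge
        have hxm : x ≤ xs[(lo + hi) / 2] := not_lt.mp hx
        rcases Nat.lt_or_ge ((lo + hi) / 2) j with h | h
        · exact le_trans hxm (hpw ((lo + hi) / 2) j hmid hj h)
        · have : (lo + hi) / 2 = j := by omega
          subst this; exact hxm
    · simp only [hlt, if_false]
      have : lo = hi := by omega
      subst this
      exact ⟨by omega, hlo, hhi⟩

lemma bisectRightLoop_spec {α : Type} [LinearOrder α] [inst : DecidableLT α] (xs : List α) (x : α)
    (hs : xs.Pairwise (· ≤ ·)) :
    ∀ (fuel lo hi : Nat), lo ≤ hi → hi ≤ xs.length → hi - lo ≤ fuel →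
    (∀ j (hj : j < xs.length), j < lo → xs[j] ≤ x) →
    (∀ j (hj : j < xs.length), hi ≤ j → x < xs[j]) →
    PySem.List.bisectRightLoop xs x fuel lo hi ≤ xs.length ∧
    (∀ j (hj : j < xs.length), j < PySem.List.bisectRightLoop xs x fuel lo hi → xs[j] ≤ x) ∧
    (∀ j (hj : j < xs.length), PySem.List.bisectRightLoop xs x fuel lo hi ≤ j → x < xs[j]) := by
  intro fuel
  induction fuel with
  | zero =>
    intro lo hi h1 h2 h3 hlo hhi
    have : lo = hi := by omega
    subst this
    simp only [PySem.List.bisectRightLoop]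
    exact ⟨by omega, hlo, hhi⟩
  | succ fuel ih =>
    intro lo hi h1 h2 h3 hlo hhi
    simp only [PySem.List.bisectRightLoop]
    by_cases hlt : lo < hi
    · simp only [hlt, if_true]
      have hmid : (lo + hi) / 2 < xs.length := by omega
      rw [List.getElem?_eq_getElem hmid]
      have hpw := List.pairwise_iff_getElem.mp hs
      by_cases hx : x < xs[(lo + hi) / 2]
      · simp only [hx, if_true]
        refine ih lo ((lo + hi) / 2) (by omega) (by omega) (by omega) hlo ?_
        intro j hj hjge
        rcases Nat.lt_or_ge ((lo + hi) / 2) j with h | h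
        · exact lt_of_lt_of_le hx (hpw ((lo + hi) / 2) j hmid hj h)
        · have : (lo + hi) / 2 = j := by omega
          subst this; exact hx
      · simp only [hx, if_false]
        refine ih ((lo + hi) / 2 + 1) hi (by omega) h2 (by omega) ?_ hhi
        intro j hj hjlt
        have hxm : xs[(lo + hi) / 2] ≤ x := not_lt.mp hx
        rcases Nat.lt_succ_iff_lt_or_eq.mp hjlt with h | h
        · exact le_trans (hpw j ((lo + hi) / 2) hj hmid h) hxm
        · subst h; exact hxm
    · rw [if_neg hlt]
      have : lo = hi := by omega
      subst this
      exact ⟨by omega, hlo, hhi⟩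

-- If the first r elements satisfy P and the rest do not, the count of P is r.
lemma countP_eq_of_pointwise {α : Type} (xs : List α) (P : α → Bool) (r : Nat) (hr : r ≤ xs.length)
    (h1 : ∀ j (hj : j < xs.length), j < r → P xs[j] = true)
    (h2 : ∀ j (hj : j < xs.length), r ≤ j → P xs[j] = false) :
    xs.countP P = r := by
  have hfilter : xs.filter P = xs.take r := by
    conv_lhs => rw [← List.take_append_drop r xs, List.filter_append]
    have ht : (xs.take r).filter P = xs.take r := by
      apply List.filter_eq_self.mpr
      intro a ha
      obtain ⟨i, hi, rfl⟩ := List.getElem_of_mem ha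
      rw [List.getElem_take]
      exact h1 i (by simp at hi; omega) (by simp at hi; omega)
    have hd : (xs.drop r).filter P = [] := by
      apply List.filter_eq_nil_iff.mpr
      intro a ha
      obtain ⟨i, hi, rfl⟩ := List.getElem_of_mem ha
      rw [List.getElem_drop]
      simp only [List.length_drop] at hi
      simp [h2 (r + i) (by omega) (by omega)]
    rw [ht, hd, List.append_nil]
  rw [List.countP_eq_length_filter, hfilter, List.length_take]
  omega

lemma bisectLeft_count {α : Type} [LinearOrder α] [inst : DecidableLT α] (xs : List α) (x : α)
    (hs : xs.Pairwise (· ≤ ·)) :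
    PySem.List.bisectLeft xs x = xs.countP (fun w => decide (w < x)) := by
  obtain ⟨hb, h1, h2⟩ := bisectLeftLoop_spec xs x hs xs.length 0 xs.length (by omega) le_rfl
    (by omega) (by omega) (by intro j hj hji; omega)
  exact (countP_eq_of_pointwise xs _ _ hb (fun j hj hjr => by simp [h1 j hj hjr])
    (fun j hj hjr => by simp [h2 j hj hjr])).symm

lemma bisectRight_count {α : Type} [LinearOrder α] [inst : DecidableLT α] (xs : List α) (x : α)
    (hs : xs.Pairwise (· ≤ ·)) :
    PySem.List.bisectRight xs x = xs.countP (fun w => decide (w ≤ x)) := by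
  obtain ⟨hb, h1, h2⟩ := bisectRightLoop_spec xs x hs xs.length 0 xs.length (by omega) le_rfl
    (by omega) (by omega) (by intro j hj hji; omega)
  exact (countP_eq_of_pointwise xs _ _ hb (fun j hj hjr => by simp [h1 j hj hjr])
    (fun j hj hjr => by simp [(h2 j hj hjr).not_ge])).symm

-- On a sorted list, the drop/take window cut at the two counts is exactly the range filter.
lemma filter_range_sorted {α : Type} [LinearOrder α] (p h : α) :
    ∀ (xs : List α), xs.Pairwise (· ≤ ·) →
    List.take (xs.countP (fun w => decide (w ≤ h)) - xs.countP (fun w => decide (w < p)))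
      (List.drop (xs.countP (fun w => decide (w < p))) xs)
    = xs.filter (fun w => decide (p ≤ w) && decide (w ≤ h)) := by
  intro xs
  induction xs with
  | nil => intro _; simp
  | cons y t ih =>
    intro hpw
    rw [List.pairwise_cons] at hpw
    obtain ⟨hy, ht⟩ := hpw
    by_cases hyp : y < p
    · by_cases hyh : y ≤ h
      · simp only [List.countP_cons, hyp, hyh, decide_true, if_true, List.filter_cons,
          not_le.mpr hyp, decide_false, Bool.false_and]
        rw [List.drop_succ_cons]
        have : t.countP (fun w => decide (w ≤ h)) + 1 - (t.countP (fun w => decide (w < p)) + 1)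
            = t.countP (fun w => decide (w ≤ h)) - t.countP (fun w => decide (w < p)) := by omega
        rw [this]
        exact ih ht
      · have hR : (y :: t).countP (fun w => decide (w ≤ h)) = 0 := by
          apply List.countP_eq_zero.mpr
          intro a ha
          rcases List.mem_cons.mp ha with rfl | ha
          · simp [hyh]
          · simp [not_le.mpr (lt_of_not_ge (fun hc => hyh (le_trans (hy a ha) hc)))]
        have hF : (y :: t).filter (fun w => decide (p ≤ w) && decide (w ≤ h)) = [] := by
          apply List.filter_eq_nil_iff.mpr
          intro a ha
          rcases List.mem_cons.mp ha with rfl | ha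
          · simp [hyh]
          · simp [not_le.mpr (lt_of_not_ge (fun hc => hyh (le_trans (hy a ha) hc)))]
        rw [hR, hF, Nat.zero_sub, List.take_zero]
    · have hp : p ≤ y := not_lt.mp hyp
      have hL : (y :: t).countP (fun w => decide (w < p)) = 0 := by
        apply List.countP_eq_zero.mpr
        intro a ha
        rcases List.mem_cons.mp ha with rfl | ha
        · simp [hyp]
        · simp [not_lt.mpr (le_trans hp (hy a ha))]
      have hLt : t.countP (fun w => decide (w < p)) = 0 := by
        apply List.countP_eq_zero.mpr
        intro a ha
        simp [not_lt.mpr (le_trans hp (hy a ha))]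
      by_cases hyh : y ≤ h
      · rw [hL]
        simp only [List.countP_cons, hyh, decide_true, if_true, List.drop_zero,
          List.filter_cons, hp, Bool.and_self, Nat.sub_zero]
        rw [List.take_succ_cons]
        have := ih ht
        rw [hLt, Nat.sub_zero, List.drop_zero] at this
        simp [this]
      · have hR : (y :: t).countP (fun w => decide (w ≤ h)) = 0 := by
          apply List.countP_eq_zero.mpr
          intro a ha
          rcases List.mem_cons.mp ha with rfl | ha
          · simp [hyh]
          · simp [not_le.mpr (lt_of_not_ge (fun hc => hyh (le_trans (hy a ha) hc)))]
        have hF : (y :: t).filter (fun w => decide (p ≤ w) && decide (w ≤ h)) = [] := by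
          apply List.filter_eq_nil_iff.mpr
          intro a ha
          rcases List.mem_cons.mp ha with rfl | ha
          · simp [hyh]
          · simp [not_le.mpr (lt_of_not_ge (fun hc => hyh (le_trans (hy a ha) hc)))]
        rw [hR, hF, Nat.zero_sub, List.take_zero]

-- The bisect window over the sorted word list equals the linear range filter.
lemma slice_eq_filter (words : List String) (prefix_ : String) :
    PySem.List.slice (PySem.List.sorted words (fun w => w) false)
      (some ((PySem.List.bisectLeft (PySem.List.sorted words (fun w => w) false) prefix_ : Nat) : Int))
      (some ((PySem.List.bisectRight (PySem.List.sorted words (fun w => w) false) (prefix_ ++ "~") : Nat) : Int))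
    = (PySem.List.sorted words (fun w => w) false).filter
        (fun w => decide (prefix_ ≤ w) && decide (w ≤ prefix_ ++ "~")) := by
  have hs : (PySem.List.sorted words (fun w => w) false).Pairwise (· ≤ ·) :=
    PySem.List.sorted_pairwise words (fun w => w)
  rw [PySem.List.slice_natCast, bisectLeft_count _ _ hs, bisectRight_count _ _ hs]
  exact filter_range_sorted prefix_ (prefix_ ++ "~") _ hs

-- The order both final sorts produce: frequency descending, then the word ascending.
def pvQ (f : String → Int) (a b : String) : Prop := f b ≤ f a ∧ (f b < f a ∨ a ≤ b)

-- A's final stable reverse sort: inserting x (which comes AFTER everything in acc alphabetically)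
-- into a pvQ-ordered list keeps it pvQ-ordered.
lemma insertBy_rev_pairwise (f : String → Int) (x : String) :
    ∀ (acc : List String), acc.Pairwise (pvQ f) → (∀ y ∈ acc, y ≤ x) →
    (PySem.List.insertBy (fun a b => decide (f b < f a)) x acc).Pairwise (pvQ f) := by
  intro acc
  induction acc with
  | nil => intro _ _; simp [PySem.List.insertBy]
  | cons y ys ih =>
    intro hpw hle
    rw [List.pairwise_cons] at hpw
    obtain ⟨hy, hys⟩ := hpw
    simp only [PySem.List.insertBy]
    by_cases hx : f y < f x
    · simp only [hx, decide_true, if_true]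
      refine List.pairwise_cons.mpr ⟨?_, List.pairwise_cons.mpr ⟨hy, hys⟩⟩
      intro z hz
      rcases List.mem_cons.mp hz with rfl | hz
      · exact ⟨le_of_lt hx, Or.inl hx⟩
      · have := hy z hz
        exact ⟨le_trans this.1 (le_of_lt hx), Or.inl (lt_of_le_of_lt this.1 hx)⟩
    · simp only [hx, decide_false]
      refine List.pairwise_cons.mpr ⟨?_, ih hys (fun z hz => hle z (List.mem_cons_of_mem _ hz))⟩
      intro z hz
      rcases (PySem.List.mem_insertBy _ _ _ _).mp hz with rfl | hz
      · exact ⟨not_lt.mp hx, Or.inr (hle y (List.mem_cons_self))⟩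
      · exact hy z hz
-- A's final sort loop over an alphabetically sorted list yields a pvQ-ordered list.
lemma foldl_insertBy_rev_pairwise (f : String → Int) :
    ∀ (xs acc : List String), acc.Pairwise (pvQ f) → (∀ y ∈ acc, ∀ x ∈ xs, y ≤ x) →
    xs.Pairwise (· ≤ ·) →
    (xs.foldl (fun acc x => PySem.List.insertBy (fun a b => decide (f b < f a)) x acc) acc).Pairwise (pvQ f) := by
  intro xs
  induction xs with
  | nil => intro acc h _ _; simpa using h
  | cons x t ih =>
    intro acc hacc hcross hxs
    rw [List.pairwise_cons] at hxs
    simp only [List.foldl_cons]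
    refine ih _ (insertBy_rev_pairwise f x acc hacc
      (fun y hy => hcross y hy x List.mem_cons_self)) ?_ hxs.2
    intro y hy z hz
    rcases (PySem.List.mem_insertBy _ _ _ _).mp hy with rfl | hy
    · exact hxs.1 z hz
    · exact hcross y hy z (List.mem_cons_of_mem _ hz)

-- B's single lex-key sort: insertion under the tuple comparator keeps pvQ-order (no side condition:
-- the comparator itself breaks frequency ties alphabetically).
lemma insertBy_lex_pairwise (f : String → Int) (x : String) :
    ∀ (acc : List String), acc.Pairwise (pvQ f) →
    (PySem.List.insertBy
      (fun a b => decide (-(f a) < -(f b)) || (!decide (-(f b) < -(f a)) && decide (a < b))) x acc).Pairwise (pvQ f) := by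
  intro acc
  induction acc with
  | nil => intro _; simp [PySem.List.insertBy]
  | cons y ys ih =>
    intro hpw
    rw [List.pairwise_cons] at hpw
    obtain ⟨hy, hys⟩ := hpw
    simp only [PySem.List.insertBy]
    by_cases hbb : (decide (-(f x) < -(f y)) || (!decide (-(f y) < -(f x)) && decide (x < y))) = true
    · rw [if_pos hbb]
      simp only [Bool.or_eq_true, Bool.and_eq_true, Bool.not_eq_true', decide_eq_true_eq,
        decide_eq_false_iff_not] at hbb
      have hxy : pvQ f x y := by
        rcases hbb with h | ⟨h1, h2⟩
        · exact ⟨by omega, Or.inl (by omega)⟩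
        · exact ⟨by omega, Or.inr (le_of_lt h2)⟩
      obtain ⟨ha1, ha2⟩ := hxy
      refine List.pairwise_cons.mpr ⟨?_, List.pairwise_cons.mpr ⟨hy, hys⟩⟩
      intro z hz
      rcases List.mem_cons.mp hz with rfl | hz
      · exact ⟨ha1, ha2⟩
      · obtain ⟨hz1, hz2⟩ := hy z hz
        refine ⟨le_trans hz1 ha1, ?_⟩
        by_cases hlt : f z < f x
        · exact Or.inl hlt
        · have hyz : y ≤ z := by
            rcases hz2 with h | h
            · exact absurd (lt_of_lt_of_le h ha1) hlt
            · exact h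
          have hxy' : x ≤ y := by
            rcases ha2 with h | h
            · exact absurd (lt_of_le_of_lt hz1 h) hlt
            · exact h
          exact Or.inr (le_trans hxy' hyz)
    · rw [if_neg hbb]
      simp only [Bool.or_eq_true, Bool.and_eq_true, Bool.not_eq_true', decide_eq_true_eq,
        decide_eq_false_iff_not] at hbb
      push_neg at hbb
      obtain ⟨h1, h2⟩ := hbb
      have hyx : pvQ f y x := by
        refine ⟨by omega, ?_⟩
        by_cases hlt : f x < f y
        · exact Or.inl hlt
        · exact Or.inr (not_lt.mp (h2 (by omega)))
      refine List.pairwise_cons.mpr ⟨?_, ih hys⟩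
      intro z hz
      rcases (PySem.List.mem_insertBy _ _ _ _).mp hz with rfl | hz
      · exact hyx
      · exact hy z hz

lemma foldl_insertBy_lex_pairwise (f : String → Int) :
    ∀ (xs acc : List String), acc.Pairwise (pvQ f) →
    (xs.foldl (fun acc x => PySem.List.insertBy
      (fun a b => decide (-(f a) < -(f b)) || (!decide (-(f b) < -(f a)) && decide (a < b))) x acc) acc).Pairwise (pvQ f) := by
  intro xs
  induction xs with
  | nil => intro acc h; simpa using h
  | cons x t ih =>
    intro acc hacc
    simp only [List.foldl_cons]
    exact ih _ (insertBy_lex_pairwise f x acc hacc)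

-- pvQ is exactly ≤ under the injective key  w ↦ (-f w, w)  in lexicographic order.
lemma pvQ_iff_lex_le (f : String → Int) (a b : String) :
    pvQ f a b ↔ (toLex (-(f a), a) : Lex (Int × String)) ≤ toLex (-(f b), b) := by
  rw [Prod.Lex.le_iff]
  unfold pvQ
  constructor
  · rintro ⟨h1, h2 | h2⟩
    · exact Or.inl (by simpa using h2)
    · rcases lt_or_eq_of_le h1 with h | h
      · exact Or.inl (by simpa using h)
      · exact Or.inr ⟨by simp; omega, h2⟩
  · rintro (h | ⟨h1, h2⟩)
    · simp only [ofLex_toLex] at h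
      exact ⟨by omega, Or.inl (by omega)⟩
    · simp only [ofLex_toLex] at h1 h2
      exact ⟨by omega, Or.inr h2⟩

-- ===== VERDICT (by name: the statement is the Claim_ definition above) =====
theorem find_suggestions_spec : Claim_equal_find_suggestions := by
  intro words frequencies prefix_ _hdom _hpre
  unfold Spec_find_suggestions find_suggestions find_suggestions_alt
  simp only []
  rw [slice_eq_filter words prefix_]
  set f : String → Int := fun w => (pvBuildFreq words frequencies).getD w 0 with hf
  set P : String → Bool := fun w => decide (prefix_ ≤ w) && decide (w ≤ prefix_ ++ "~") with hP
  -- both sides are permutations of words.filter P, and both are pvQ-ordered; the key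
  -- w ↦ (-f w, w) is injective, so they are equal.
  have hsortedwords : (PySem.List.sorted words (fun w => w) false).Pairwise (· ≤ ·) :=
    PySem.List.sorted_pairwise words (fun w => w)
  have hA : (PySem.List.sorted ((PySem.List.sorted words (fun w => w) false).filter P) f true).Pairwise (pvQ f) := by
    have : PySem.List.sorted ((PySem.List.sorted words (fun w => w) false).filter P) f true
        = ((PySem.List.sorted words (fun w => w) false).filter P).foldl
            (fun acc x => PySem.List.insertBy (fun a b => decide (f b < f a)) x acc) [] := rfl
    rw [this]
    exact foldl_insertBy_rev_pairwise f _ [] (by simp) (by simp)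
      (List.Pairwise.filter P hsortedwords)
  have hB : (PySem.List.sorted2 (words.filter P) (fun w => -(f w)) (fun w => w) false).Pairwise (pvQ f) := by
    have : PySem.List.sorted2 (words.filter P) (fun w => -(f w)) (fun w => w) false
        = (words.filter P).foldl (fun acc x => PySem.List.insertBy
            (fun a b => decide (-(f a) < -(f b)) || (!decide (-(f b) < -(f a)) && decide (a < b))) x acc) [] := rfl
    rw [this]
    exact foldl_insertBy_lex_pairwise f _ [] (by simp)
  have hperm : (PySem.List.sorted ((PySem.List.sorted words (fun w => w) false).filter P) f true).Perm
      (PySem.List.sorted2 (words.filter P) (fun w => -(f w)) (fun w => w) false) := by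
    refine ((PySem.List.sorted_perm _ _ _).trans ?_).trans (PySem.List.sorted2_perm _ _ _ _).symm
    exact List.Perm.filter P (PySem.List.sorted_perm words (fun w => w) false)
  exact PySem.List.eq_of_perm_of_pairwise_le_of_injective
    (fun w => (toLex (-(f w), w) : Lex (Int × String)))
    (fun a b h => by simpa using congrArg (fun x => (ofLex x).2) h)
    hperm
    (hA.imp (fun h => (pvQ_iff_lex_le f _ _).mp h))
    (hB.imp (fun h => (pvQ_iff_lex_le f _ _).mp h))
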